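-- pv_equiv track=rewrite | github.com/Erennmayss/Software_secu | accounts/utils.py | ingredient_matches_any
-- ===== SOURCE A (Python) =====
-- from typing import Iterable
--
-- def ingredient_matches_any(ingredients: Iterable[str], keywords: Iterable[str]) -> list[str]:
--     matches = []
--     for ingredient in ingredients:
--         lower = ingredient.lower()
--         for keyword in keywords:
--             if keyword and keyword in lower:
--                 matches.append(keyword)
--     return sorted(set(matches))
-- ===== SOURCE B (Python) =====
-- def ingredient_matches_any(ingredients, keywords):
--     # Substring index: enumerate every substring (up to the longest keyword's
--     # length) of each lowered ingredient once into a set, then answer each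
--     # distinct keyword by a single set lookup.
--     kws = sorted({kw for kw in keywords if kw})
--     maxlen = 0
--     for kw in kws:
--         maxlen = max(maxlen, len(kw))
--     subs = set()
--     for ingredient in ingredients:
--         t = ingredient.lower()
--         n = len(t)
--         for i in range(n):
--             for j in range(i + 1, min(i + maxlen, n) + 1):
--                 subs.add(t[i:j])
--     return [kw for kw in kws if kw in subs]
-- ===== Notes on version B (the rewrite author's own statement) =====
-- stated objective: faster
-- what changed: B replaces A's per-(ingredient,keyword) substring scans with a substring index: it enumerates every substring of each lowered ingredient up to the longest keyword's length into a set once, then answers each distinct sorted keyword by a single set lookup, eliminating the K containment scans per ingredient and the final dedup+sort of the hit list.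
import Mathlib
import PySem

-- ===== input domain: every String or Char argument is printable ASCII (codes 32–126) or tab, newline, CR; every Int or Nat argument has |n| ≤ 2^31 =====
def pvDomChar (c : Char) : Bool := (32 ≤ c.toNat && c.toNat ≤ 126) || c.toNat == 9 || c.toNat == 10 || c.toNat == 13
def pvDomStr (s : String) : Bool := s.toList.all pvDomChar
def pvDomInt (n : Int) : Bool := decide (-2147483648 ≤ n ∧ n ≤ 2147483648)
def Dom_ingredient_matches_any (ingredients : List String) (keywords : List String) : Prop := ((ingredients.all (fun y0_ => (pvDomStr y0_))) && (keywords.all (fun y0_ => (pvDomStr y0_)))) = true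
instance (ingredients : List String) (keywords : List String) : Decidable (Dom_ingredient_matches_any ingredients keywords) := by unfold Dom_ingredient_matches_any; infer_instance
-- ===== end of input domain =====

-- B builds a substring index: every substring (up to the longest keyword's length) of each
-- lowered ingredient goes into a set once, then each distinct keyword is answered by one lookup.

-- ===== PORT A =====
def ingredient_matches_any (ingredients : List String) (keywords : List String) : List String :=
  let hits : List String :=
    ingredients.foldl (fun acc ingredient =>
      let lower := PySem.Str.lower ingredient
      keywords.foldl (fun acc2 keyword =>
        if !(keyword == "") && PySem.Str.isIn keyword lower then acc2 ++ [keyword] else acc2)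
        acc) []
  PySem.List.sorted (PySem.Set.ofList hits) (fun x => x) false

-- ===== PORT B =====
def ingredient_matches_any_alt (ingredients : List String) (keywords : List String) : List String :=
  let kws := PySem.List.sorted (PySem.Set.ofList (keywords.filter (fun kw => !(kw == "")))) (fun x => x) false
  let maxlen : Int := kws.foldl (fun acc kw => max acc (PySem.Str.len kw)) 0
  let subs : PySem.Set String :=
    ingredients.foldl (fun s ingredient =>
      let t := PySem.Str.lower ingredient
      let n : Int := PySem.Str.len t
      (PySem.List.pyRange 0 n 1).foldl (fun s1 i =>
        (PySem.List.pyRange (i + 1) (min (i + maxlen) n + 1) 1).foldl (fun s2 j =>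
          PySem.Set.add s2 (PySem.Str.slice t (some i) (some j))) s1) s)
      PySem.Set.empty
  kws.filter (fun kw => PySem.Set.contains subs kw)

-- ===== PRECONDITION & SPEC =====
def Spec_ingredient_matches_any (ingredients : List String) (keywords : List String) (out : List String) : Prop := out = ingredient_matches_any_alt ingredients keywords
instance (ingredients : List String) (keywords : List String) (out : List String) : Decidable (Spec_ingredient_matches_any ingredients keywords out) := by unfold Spec_ingredient_matches_any; infer_instance

-- ===== CLAIM (what is proved, stated in full; the proofs are below) =====
def Claim_equal_ingredient_matches_any : Prop := ∀ (ingredients : List String) (keywords : List String), Dom_ingredient_matches_any ingredients keywords → Spec_ingredient_matches_any ingredients keywords (ingredient_matches_any ingredients keywords)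

-- ===== LEMMAS AND PROOFS =====

-- membership in a fold that only grows a set
theorem pv_mem_foldl_set {α β : Type} [BEq α] [LawfulBEq α]
    (g : PySem.Set α → β → PySem.Set α) (P : α → β → Prop)
    (hg : ∀ s b y, y ∈ g s b ↔ y ∈ s ∨ P y b) :
    ∀ (l : List β) (s : PySem.Set α) (y : α),
      y ∈ l.foldl g s ↔ y ∈ s ∨ ∃ b ∈ l, P y b := by
  intro l
  induction l with
  | nil => simp
  | cons b t ih =>
    intro s y
    rw [List.foldl_cons, ih, hg]
    simp only [List.mem_cons]
    constructor
    · rintro ((h | h) | ⟨c, hc, hP⟩)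
      · exact Or.inl h
      · exact Or.inr ⟨b, Or.inl rfl, h⟩
      · exact Or.inr ⟨c, Or.inr hc, hP⟩
    · rintro (h | ⟨c, (rfl | hc), hP⟩)
      · exact Or.inl (Or.inl h)
      · exact Or.inl (Or.inr hP)
      · exact Or.inr ⟨c, hc, hP⟩

-- what the substring-index set contains
theorem pv_mem_subs (ingredients : List String) (maxlen : Int) (y : String) :
    y ∈ ingredients.foldl (fun s ingredient =>
      let t := PySem.Str.lower ingredient
      let n : Int := PySem.Str.len t
      (PySem.List.pyRange 0 n 1).foldl (fun s1 i =>
        (PySem.List.pyRange (i + 1) (min (i + maxlen) n + 1) 1).foldl (fun s2 j =>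
          PySem.Set.add s2 (PySem.Str.slice t (some i) (some j))) s1) s)
      PySem.Set.empty
    ↔ ∃ ing ∈ ingredients, ∃ i ∈ PySem.List.pyRange 0 (PySem.Str.len (PySem.Str.lower ing)) 1,
        ∃ j ∈ PySem.List.pyRange (i + 1) (min (i + maxlen) (PySem.Str.len (PySem.Str.lower ing)) + 1) 1,
          y = PySem.Str.slice (PySem.Str.lower ing) (some i) (some j) := by
  rw [pv_mem_foldl_set _
    (fun y ing => ∃ i ∈ PySem.List.pyRange 0 (PySem.Str.len (PySem.Str.lower ing)) 1,
        ∃ j ∈ PySem.List.pyRange (i + 1) (min (i + maxlen) (PySem.Str.len (PySem.Str.lower ing)) + 1) 1,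
          y = PySem.Str.slice (PySem.Str.lower ing) (some i) (some j))
    (fun s ing y => by
      rw [pv_mem_foldl_set _
        (fun y i => ∃ j ∈ PySem.List.pyRange (i + 1) (min (i + maxlen) (PySem.Str.len (PySem.Str.lower ing)) + 1) 1,
            y = PySem.Str.slice (PySem.Str.lower ing) (some i) (some j))
        (fun s1 i y => by
          rw [pv_mem_foldl_set _
            (fun y j => y = PySem.Str.slice (PySem.Str.lower ing) (some i) (some j))
            (fun s2 j y => PySem.Set.mem_add s2 _ y)])])]
  simp [PySem.Set.empty]

-- a bounded nonempty keyword occurs as an enumerated slice iff it is a substring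
theorem pv_slice_iff_isIn (t kw : String) (maxlen : Int)
    (hne : kw ≠ "") (hlen : PySem.Str.len kw ≤ maxlen) :
    (∃ i ∈ PySem.List.pyRange 0 (PySem.Str.len t) 1,
        ∃ j ∈ PySem.List.pyRange (i + 1) (min (i + maxlen) (PySem.Str.len t) + 1) 1,
          kw = PySem.Str.slice t (some i) (some j))
    ↔ PySem.Str.isIn kw t = true := by
  have hnil : kw.toList ≠ [] := fun h => hne (String.toList_inj.mp (by simp [h]))
  rw [PySem.Str.isIn_eq, ← PySem.Chars.exists_prefix_drop_iff_isIn]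
  constructor
  · rintro ⟨i, hi, j, hj, rfl⟩
    rw [PySem.List.mem_pyRange_one] at hi hj
    refine ⟨i.toNat, ?_⟩
    have h0i : (0 : Int) ≤ i := hi.1
    have h0j : (0 : Int) ≤ j := by omega
    rw [show (PySem.Str.slice t (some i) (some j)).toList
        = List.take (j.toNat - i.toNat) (List.drop i.toNat t.toList) by
      rw [PySem.Str.toList_slice]
      simp only [PySem.Chars.slice_eq_listSlice]
      exact PySem.List.slice_toNat _ h0i h0j]
    exact List.take_prefix _ _
  · rintro ⟨j0, hpre⟩
    have hL : kw.toList.length ≤ t.toList.length - j0 := by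
      have := hpre.length_le
      simpa using this
    have hL1 : 1 ≤ kw.toList.length := by
      cases h : kw.toList with
      | nil => exact absurd h hnil
      | cons a l => simp [h]
    have hkwlen : PySem.Str.len kw = (kw.toList.length : Int) := PySem.Str.len_eq kw
    refine ⟨(j0 : Int), ?_, (j0 : Int) + (kw.toList.length : Int), ?_, ?_⟩
    · rw [PySem.List.mem_pyRange_one, PySem.Str.len_eq]
      constructor
      · exact Int.natCast_nonneg _
      · push_cast; omega
    · rw [PySem.List.mem_pyRange_one, PySem.Str.len_eq]
      constructor
      · omega
      · have : (kw.toList.length : Int) ≤ maxlen := by rw [← hkwlen]; exact hlen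
        push_cast
        omega
    · apply String.toList_inj.mp
      rw [PySem.Str.toList_slice]
      simp only [PySem.Chars.slice_eq_listSlice]
      rw [PySem.List.slice_toNat _ (Int.natCast_nonneg _) (by positivity)]
      rw [show ((j0 : Int) + (kw.toList.length : Int)).toNat - ((j0 : Int)).toNat
          = kw.toList.length by omega]
      rw [show ((j0 : Int)).toNat = j0 by omega]
      exact List.prefix_iff_eq_take.mp hpre

-- A's collected 'hits' list, as a flatMap of per-ingredient filters.
theorem pv_matches_eq (ingredients keywords : List String) :
    ingredients.foldl (fun acc ingredient =>
      let lower := PySem.Str.lower ingredient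
      keywords.foldl (fun acc2 keyword =>
        if !(keyword == "") && PySem.Str.isIn keyword lower then acc2 ++ [keyword] else acc2)
        acc) []
    = ingredients.flatMap (fun ingredient =>
        keywords.filter (fun keyword =>
          !(keyword == "") && PySem.Str.isIn keyword (PySem.Str.lower ingredient))) := by
  have h : ∀ acc, ingredients.foldl (fun acc ingredient =>
      keywords.foldl (fun acc2 keyword =>
        if !(keyword == "") && PySem.Str.isIn keyword (PySem.Str.lower ingredient)
        then acc2 ++ [keyword] else acc2) acc) acc
      = acc ++ ingredients.flatMap (fun ingredient =>
          keywords.filter (fun keyword =>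
            !(keyword == "") && PySem.Str.isIn keyword (PySem.Str.lower ingredient))) := by
    intro acc
    rw [show (fun acc ingredient =>
        keywords.foldl (fun acc2 keyword =>
          if !(keyword == "") && PySem.Str.isIn keyword (PySem.Str.lower ingredient)
          then acc2 ++ [keyword] else acc2) acc)
      = (fun (acc : List String) ingredient => acc ++
          keywords.filter (fun keyword =>
            !(keyword == "") && PySem.Str.isIn keyword (PySem.Str.lower ingredient)))
      from funext fun acc => funext fun ingredient =>
        PySem.List.foldl_append_if_eq_filter _ keywords acc]
    exact PySem.List.foldl_append_eq_flatMap _ ingredients acc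
  simpa using h []

theorem ingredient_matches_any_spec : Claim_equal_ingredient_matches_any := by
  unfold Claim_equal_ingredient_matches_any Spec_ingredient_matches_any
  intro ingredients keywords _
  unfold ingredient_matches_any ingredient_matches_any_alt
  simp only [pv_matches_eq]
  set kws := PySem.List.sorted (PySem.Set.ofList (keywords.filter (fun kw => !(kw == "")))) (fun x => x) false with hkws
  set maxlen : Int := kws.foldl (fun acc kw => max acc (PySem.Str.len kw)) 0 with hml
  set subs := ingredients.foldl (fun s ingredient =>
      let t := PySem.Str.lower ingredient
      let n : Int := PySem.Str.len t
      (PySem.List.pyRange 0 n 1).foldl (fun s1 i =>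
        (PySem.List.pyRange (i + 1) (min (i + maxlen) n + 1) 1).foldl (fun s2 j =>
          PySem.Set.add s2 (PySem.Str.slice t (some i) (some j))) s1) s)
      PySem.Set.empty with hsubs
  set ys := kws.filter (fun kw => PySem.Set.contains subs kw) with hys
  set hits := ingredients.flatMap (fun ingredient =>
      keywords.filter (fun keyword =>
        !(keyword == "") && PySem.Str.isIn keyword (PySem.Str.lower ingredient))) with hm
  have hkws_nodup : kws.Nodup :=
    (PySem.List.sorted_perm (PySem.Set.ofList (keywords.filter (fun kw => !(kw == ""))))
      (fun x => x) false).symm.nodup (PySem.Set.nodup_ofList _)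
  have hkws_mem : ∀ kw, kw ∈ kws ↔ kw ∈ keywords ∧ kw ≠ "" := by
    intro kw
    rw [hkws, PySem.List.mem_sorted, PySem.Set.mem_ofList, List.mem_filter]
    simp
  have hbound : ∀ kw ∈ kws, PySem.Str.len kw ≤ maxlen := by
    intro kw hkw
    exact (PySem.List.le_foldl_max_int kws (fun kw => PySem.Str.len kw) 0).2 kw hkw
  have hmem : ∀ y, y ∈ ys ↔ y ∈ PySem.Set.ofList hits := by
    intro y
    rw [hys, List.mem_filter, PySem.Set.contains_iff, hsubs, pv_mem_subs]
    rw [PySem.Set.mem_ofList, hm, List.mem_flatMap]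
    constructor
    · rintro ⟨hy, ing, hing, hslice⟩
      have hy' := (hkws_mem y).mp hy
      refine ⟨ing, hing, ?_⟩
      rw [List.mem_filter]
      refine ⟨hy'.1, ?_⟩
      have := (pv_slice_iff_isIn (PySem.Str.lower ing) y maxlen hy'.2 (hbound y hy)).mp hslice
      simp only [Bool.and_eq_true]
      exact ⟨by simp [hy'.2], this⟩
    · rintro ⟨ing, hing, hfy⟩
      rw [List.mem_filter] at hfy
      obtain ⟨hyk, hcond⟩ := hfy
      rw [Bool.and_eq_true] at hcond
      have hne : y ≠ "" := by simpa using hcond.1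
      have hin : PySem.Str.isIn y (PySem.Str.lower ing) = true := hcond.2
      have hy : y ∈ kws := (hkws_mem y).mpr ⟨hyk, hne⟩
      exact ⟨hy, ing, hing,
        (pv_slice_iff_isIn (PySem.Str.lower ing) y maxlen hne (hbound y hy)).mpr hin⟩
  have hnodup_ys : ys.Nodup := by
    rw [hys]; exact List.Nodup.filter _ hkws_nodup
  have hperm : ys.Perm (PySem.Set.ofList hits) :=
    (List.perm_ext_iff_of_nodup hnodup_ys (PySem.Set.nodup_ofList _)).mpr hmem
  have hpw : ys.Pairwise (fun a b => (fun x => x) a < (fun x => x) b) := by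
    rw [hys, hkws]
    exact List.Pairwise.sublist (List.filter_sublist)
      (PySem.List.sorted_ofList_pairwise_lt _)
  exact (PySem.List.sorted_eq_of_perm_of_pairwise_lt _ ys (fun x => x) hperm hpw)
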